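-- pv_equiv track=rewrite | github.com/S-Christensen/cartographersStudy | scoringCards.py | gnomishcolony
-- ===== SOURCE A (Python) =====
-- def dfs(grid, row, col, visited, terrain_type):
--     stack = [(row, col)]
--     cluster = []
--
--     while stack:
--         r, c = stack.pop()
--         if (r, c) not in visited and grid[r][c] == terrain_type:
--             visited.add((r, c))
--             cluster.append((r, c))
--             for dr, dc in [(1, 0), (-1, 0), (0, 1), (0, -1)]:
--                 nr, nc = r + dr, c + dc
--                 if 0 <= nr < len(grid) and 0 <= nc < len(grid[0]):
--                     stack.append((nr, nc))
--     return cluster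
--
-- def gnomishcolony(grid, terrain_type="village"):
--     visited = set()
--     clusters = []
--
--     for row in range(len(grid)):
--         for col in range(len(grid[0])):
--             if (row, col) not in visited and grid[row][col] == terrain_type:
--                 cluster = dfs(grid, row, col, visited, terrain_type)
--                 clusters.append(cluster)
--
--     count_2x2 = 0
--     for cluster in clusters:
--         if any(
--                 (r, c) in cluster and
--                 (r + 1, c) in cluster and
--                 (r, c + 1) in cluster and
--                 (r + 1, c + 1) in cluster
--                 for r, c in cluster
--         ):
--             count_2x2 += 1
--
--     return count_2x2*6
-- ===== SOURCE B (Python) =====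
-- def gnomishcolony(grid, terrain_type="village"):
--     rows = len(grid)
--     cols = len(grid[0]) if grid else 0
--     cells = {(r, c) for r in range(rows) for c in range(cols) if grid[r][c] == terrain_type}
--     seen = set()
--     score = 0
--     for r in range(rows):
--         for c in range(cols):
--             if (r, c) in cells and (r, c) not in seen:
--                 seen.add((r, c))
--                 queue = [(r, c)]
--                 i = 0
--                 has_block = False
--                 while i < len(queue):
--                     cr, cc = queue[i]
--                     i += 1
--                     if (cr + 1, cc) in cells and (cr, cc + 1) in cells and (cr + 1, cc + 1) in cells:
--                         has_block = True
--                     for nb in ((cr + 1, cc), (cr - 1, cc), (cr, cc + 1), (cr, cc - 1)):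
--                         if nb in cells and nb not in seen:
--                             seen.add(nb)
--                             queue.append(nb)
--                 if has_block:
--                     score += 6
--     return score
-- ===== Notes on version B (the rewrite author's own statement) =====
-- stated objective: alternative
-- what changed: Replaces the stack-DFS that collects explicit cluster lists and a second pass testing 2x2 blocks by quadratic list membership, with a single pass: a precomputed set of terrain cells, a FIFO flood fill per component, and an inline 2x2 test against the global cell set.
import Mathlib
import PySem

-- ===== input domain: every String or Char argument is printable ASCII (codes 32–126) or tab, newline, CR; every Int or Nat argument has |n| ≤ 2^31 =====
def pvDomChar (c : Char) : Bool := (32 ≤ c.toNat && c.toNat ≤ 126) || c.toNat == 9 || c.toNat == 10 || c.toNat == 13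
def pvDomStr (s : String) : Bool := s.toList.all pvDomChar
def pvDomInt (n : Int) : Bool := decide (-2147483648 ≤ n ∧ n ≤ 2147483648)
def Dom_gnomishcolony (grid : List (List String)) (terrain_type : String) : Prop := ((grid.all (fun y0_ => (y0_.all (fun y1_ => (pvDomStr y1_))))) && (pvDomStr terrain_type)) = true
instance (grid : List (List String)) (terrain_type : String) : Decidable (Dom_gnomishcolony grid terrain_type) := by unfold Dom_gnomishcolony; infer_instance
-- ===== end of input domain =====

-- B replaces A's stack-DFS collecting cluster lists (with a quadratic list-membership 2x2 scan)
-- by one pass: a precomputed terrain-cell set, a FIFO flood fill, and an inline 2x2 test (objective: alternative).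

-- ===== PORT A =====
-- grid[r][c]; exact on Pre_ (every access the loops perform is in bounds there; none-case unreachable)
def pvAcell (grid : List (List String)) (r c : Int) : String :=
  (PySem.List.pyGet? ((PySem.List.pyGet? grid r).getD []) c).getD ""

-- len(grid[0]) (only evaluated by A when grid is nonempty)
def pvAlen0 (grid : List (List String)) : Int := (((PySem.List.pyGet? grid 0).getD []).length : Int)

-- all in-bounds cells, for the fuel bound of the while-loop below
def pvAcellsList (grid : List (List String)) : List (Int × Int) :=
  (List.range grid.length).flatMap (fun r =>
    (List.range (grid.headD []).length).map (fun c => ((r : Int), (c : Int))))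

-- the while-stack loop of A's dfs; the stack is held top-first; fuel only makes the loop
-- structurally recursive (proved sufficient at the call site), it changes no computed value
def pvAdfs (grid : List (List String)) (terrain : String) :
    Nat → List (Int × Int) → PySem.Set (Int × Int) → List (Int × Int) →
    PySem.Set (Int × Int) × List (Int × Int)
  | 0, _, visited, cluster => (visited, cluster)
  | _ + 1, [], visited, cluster => (visited, cluster)
  | fuel + 1, p :: stack, visited, cluster =>
    if ¬ p ∈ visited ∧ pvAcell grid p.1 p.2 = terrain then
      let visited' := PySem.Set.add visited p
      let cluster' := cluster ++ [p]
      let stack' := [((1 : Int), (0 : Int)), (-1, 0), (0, 1), (0, -1)].foldl (fun s d =>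
          if 0 ≤ p.1 + d.1 ∧ p.1 + d.1 < (grid.length : Int) ∧
             0 ≤ p.2 + d.2 ∧ p.2 + d.2 < pvAlen0 grid
          then (p.1 + d.1, p.2 + d.2) :: s else s) stack
      pvAdfs grid terrain fuel stack' visited' cluster'
    else pvAdfs grid terrain fuel stack visited cluster

def gnomishcolony (grid : List (List String)) (terrain_type : String) : Int :=
  let st := (PySem.List.pyRange 0 (grid.length : Int) 1).foldl (fun st row =>
      (PySem.List.pyRange 0 (pvAlen0 grid) 1).foldl (fun st col =>
        if ¬ (row, col) ∈ st.1 ∧ pvAcell grid row col = terrain_type then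
          let res := pvAdfs grid terrain_type (5 * (pvAcellsList grid).length + 2)
            [(row, col)] st.1 []
          (res.1, st.2 ++ [res.2])
        else st) st)
    ((PySem.Set.empty : PySem.Set (Int × Int)), ([] : List (List (Int × Int))))
  let count : Int := st.2.foldl (fun cnt cluster =>
      if cluster.any (fun rc => cluster.contains rc && cluster.contains (rc.1 + 1, rc.2) &&
          cluster.contains (rc.1, rc.2 + 1) && cluster.contains (rc.1 + 1, rc.2 + 1))
      then cnt + 1 else cnt) 0
  count * 6

-- ===== PORT B =====
-- len(grid[0]) if grid else 0
def pvBcols (grid : List (List String)) : Int :=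
  if grid = [] then 0 else (((PySem.List.pyGet? grid 0).getD []).length : Int)

-- the set {(r, c) | grid[r][c] == terrain_type}
def pvBcells (grid : List (List String)) (terrain_type : String) : PySem.Set (Int × Int) :=
  PySem.Set.ofList ((PySem.List.pyRange 0 (grid.length : Int) 1).flatMap (fun r =>
    ((PySem.List.pyRange 0 (pvBcols grid) 1).filter (fun c =>
      ((PySem.List.pyGet? ((PySem.List.pyGet? grid r).getD []) c).getD "") == terrain_type)).map
      (fun c => (r, c))))

def pvBnbrs (p : Int × Int) : List (Int × Int) :=
  [(p.1 + 1, p.2), (p.1 - 1, p.2), (p.1, p.2 + 1), (p.1, p.2 - 1)]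

-- B's FIFO flood fill: todo models queue[i:]; fuel only makes the loop structural
def pvBbfs (cells : PySem.Set (Int × Int)) :
    Nat → List (Int × Int) → PySem.Set (Int × Int) → Bool →
    PySem.Set (Int × Int) × Bool
  | 0, _, seen, has => (seen, has)
  | _ + 1, [], seen, has => (seen, has)
  | fuel + 1, q :: todo, seen, has =>
      let has' := has || (cells.contains (q.1 + 1, q.2) && cells.contains (q.1, q.2 + 1) &&
        cells.contains (q.1 + 1, q.2 + 1))
      let st := (pvBnbrs q).foldl (fun (st : PySem.Set (Int × Int) × List (Int × Int)) nb =>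
          if nb ∈ cells ∧ ¬ nb ∈ st.1 then (PySem.Set.add st.1 nb, st.2 ++ [nb]) else st)
        (seen, todo)
      pvBbfs cells fuel st.2 st.1 has'

def gnomishcolony_alt (grid : List (List String)) (terrain_type : String) : Int :=
  let cells := pvBcells grid terrain_type
  let fin := (PySem.List.pyRange 0 (grid.length : Int) 1).foldl (fun st r =>
      (PySem.List.pyRange 0 (pvBcols grid) 1).foldl
        (fun (st : PySem.Set (Int × Int) × Int) c =>
        if (r, c) ∈ cells ∧ ¬ (r, c) ∈ st.1 then
          let res := pvBbfs cells (cells.length + 2) [(r, c)] (PySem.Set.add st.1 (r, c)) false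
          (res.1, if res.2 then st.2 + 6 else st.2)
        else st) st)
    ((PySem.Set.empty : PySem.Set (Int × Int)), (0 : Int))
  fin.2

-- ===== PRECONDITION & SPEC =====
-- Pre_ excludes ragged grids having a row shorter than row 0: there A (and B) raise IndexError.
def Pre_gnomishcolony (grid : List (List String)) (terrain_type : String) : Prop :=
  ∀ row ∈ grid, (grid.headD []).length ≤ row.length
instance (grid : List (List String)) (terrain_type : String) :
    Decidable (Pre_gnomishcolony grid terrain_type) := by unfold Pre_gnomishcolony; infer_instance

def pvWitness_gnomishcolony : List (List String) × String :=
  ([["village", "village", "water"], ["village", "village", "water"]], "village")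

def Spec_gnomishcolony (grid : List (List String)) (terrain_type : String) (out : Int) : Prop := out = gnomishcolony_alt grid terrain_type
instance (grid : List (List String)) (terrain_type : String) (out : Int) : Decidable (Spec_gnomishcolony grid terrain_type out) := by unfold Spec_gnomishcolony; infer_instance

-- ===== CLAIM (what is proved, stated in full; the proofs are below) =====
def Claim_equal_gnomishcolony : Prop := ∀ (grid : List (List String)) (terrain_type : String), Dom_gnomishcolony grid terrain_type → Pre_gnomishcolony grid terrain_type → Spec_gnomishcolony grid terrain_type (gnomishcolony grid terrain_type)

-- ===== LEMMAS AND PROOFS =====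

def pvInB (g : List (List String)) (p : Int × Int) : Prop :=
  0 ≤ p.1 ∧ p.1 < (g.length : Int) ∧ 0 ≤ p.2 ∧ p.2 < ((g.headD []).length : Int)

def pvGood (g : List (List String)) (t : String) (p : Int × Int) : Prop :=
  pvInB g p ∧ pvAcell g p.1 p.2 = t

def pvAdj (p q : Int × Int) : Prop :=
  (q.1 = p.1 + 1 ∧ q.2 = p.2) ∨ (q.1 = p.1 - 1 ∧ q.2 = p.2) ∨
  (q.1 = p.1 ∧ q.2 = p.2 + 1) ∨ (q.1 = p.1 ∧ q.2 = p.2 - 1)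

def pvStep (G V : Int × Int → Prop) (a b : Int × Int) : Prop := pvAdj a b ∧ G b ∧ ¬ V b

def pvReach (G V : Int × Int → Prop) (q x : Int × Int) : Prop :=
  Relation.ReflTransGen (pvStep G V) q x

def pvComp (G : Int × Int → Prop) (s x : Int × Int) : Prop := pvReach G (fun _ => False) s x

def pvClosed (G V : Int × Int → Prop) : Prop := ∀ a b, V a → G b → pvAdj a b → V b

def pvAFrom (g : List (List String)) (t : String) (V : Int × Int → Prop)
    (S : List (Int × Int)) (x : Int × Int) : Prop :=
  ∃ q ∈ S, pvGood g t q ∧ ¬ V q ∧ pvReach (pvGood g t) V q x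

def pvBFrom (cells : PySem.Set (Int × Int)) (V : Int × Int → Prop)
    (S : List (Int × Int)) (x : Int × Int) : Prop :=
  ∃ q ∈ S, pvReach (fun y => y ∈ cells) V q x

def pvBlkP (cells : PySem.Set (Int × Int)) (x : Int × Int) : Prop :=
  (x.1 + 1, x.2) ∈ cells ∧ (x.1, x.2 + 1) ∈ cells ∧ (x.1 + 1, x.2 + 1) ∈ cells

def pvCnt (cl : List (Int × Int)) : Bool :=
  cl.any (fun rc => cl.contains rc && cl.contains (rc.1 + 1, rc.2) &&
    cl.contains (rc.1, rc.2 + 1) && cl.contains (rc.1 + 1, rc.2 + 1))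

def pvInv (g : List (List String)) (t : String)
    (stA : PySem.Set (Int × Int) × List (List (Int × Int)))
    (stB : PySem.Set (Int × Int) × Int) : Prop :=
  (∀ x, x ∈ stA.1 ↔ x ∈ stB.1) ∧ (∀ x ∈ stA.1, pvGood g t x) ∧
  pvClosed (pvGood g t) (fun y => y ∈ stA.1) ∧ stB.2 = 6 * (stA.2.countP pvCnt : Int)

lemma pvAdj_symm {p q : Int × Int} (h : pvAdj p q) : pvAdj q p := by
  unfold pvAdj at h ⊢; omega

lemma pvReach_mono {G V V' : Int × Int → Prop} {q x : Int × Int} (h : ∀ b, V b → V' b)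
    (hr : pvReach G V' q x) : pvReach G V q x :=
  Relation.ReflTransGen.mono (fun _a b hab => ⟨hab.1, hab.2.1, fun hb => hab.2.2 (h b hb)⟩) hr

lemma pvReach_congr {G G' V V' : Int × Int → Prop} {q x : Int × Int}
    (hG : ∀ b, G b ↔ G' b) (hV : ∀ b, V b ↔ V' b) :
    pvReach G V q x ↔ pvReach G' V' q x := by
  constructor <;> refine Relation.ReflTransGen.mono ?_
  · exact fun a b hab => ⟨hab.1, (hG b).mp hab.2.1, fun hb => hab.2.2 ((hV b).mpr hb)⟩
  · exact fun a b hab => ⟨hab.1, (hG b).mpr hab.2.1, fun hb => hab.2.2 ((hV b).mp hb)⟩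

lemma pvReach_good {G V : Int × Int → Prop} {q x : Int × Int} (h : pvReach G V q x) :
    x = q ∨ (G x ∧ ¬ V x) := by
  induction h with
  | refl => exact Or.inl rfl
  | tail h1 h2 ih => exact Or.inr ⟨h2.2.1, h2.2.2⟩

lemma pvG1A {G V : Int × Int → Prop} {p x : Int × Int} (h : pvReach G V p x) :
    x = p ∨ ∃ n, pvAdj p n ∧ G n ∧ ¬ V n ∧ n ≠ p ∧ pvReach G (fun b => V b ∨ b = p) n x := by
  induction h with
  | refl => exact Or.inl rfl
  | @tail m c h1 h2 ih =>
    by_cases hxp : c = p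
    · exact Or.inl hxp
    rcases ih with rfl | ⟨n, hn1, hn2, hn3, hn4, hn5⟩
    · exact Or.inr ⟨c, h2.1, h2.2.1, h2.2.2, hxp, Relation.ReflTransGen.refl⟩
    · exact Or.inr ⟨n, hn1, hn2, hn3, hn4,
        hn5.tail ⟨h2.1, h2.2.1, fun hc => hc.elim h2.2.2 hxp⟩⟩

lemma pvG2A {G V : Int × Int → Prop} {p q x : Int × Int} (h : pvReach G V q x) :
    pvReach G (fun b => V b ∨ b = p) q x ∨ pvReach G V p x := by
  induction h with
  | refl => exact Or.inl Relation.ReflTransGen.refl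
  | @tail m c h1 h2 ih =>
    by_cases hxp : c = p
    · subst hxp; exact Or.inr Relation.ReflTransGen.refl
    rcases ih with hl | hr
    · exact Or.inl (hl.tail ⟨h2.1, h2.2.1, fun hc => hc.elim h2.2.2 hxp⟩)
    · exact Or.inr (hr.tail h2)

lemma pvG1B {G V : Int × Int → Prop} {q x : Int × Int} (h : pvReach G V q x) :
    x = q ∨ ∃ n, (pvAdj q n ∧ G n ∧ ¬ V n) ∧
      pvReach G (fun b => V b ∨ (pvAdj q b ∧ G b ∧ ¬ V b)) n x := by
  induction h with
  | refl => exact Or.inl rfl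
  | @tail m c h1 h2 ih =>
    by_cases hxN : pvAdj q c
    · exact Or.inr ⟨c, ⟨hxN, h2.2.1, h2.2.2⟩, Relation.ReflTransGen.refl⟩
    rcases ih with rfl | ⟨n, hn1, hn2⟩
    · exact absurd h2.1 hxN
    · exact Or.inr ⟨n, hn1,
        hn2.tail ⟨h2.1, h2.2.1, fun hc => hc.elim h2.2.2 (fun hN => hxN hN.1)⟩⟩

lemma pvG2B {G V : Int × Int → Prop} {q r x : Int × Int} (h : pvReach G V r x) :
    pvReach G (fun b => V b ∨ (pvAdj q b ∧ G b ∧ ¬ V b)) r x ∨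
      ∃ n, (pvAdj q n ∧ G n ∧ ¬ V n) ∧
        pvReach G (fun b => V b ∨ (pvAdj q b ∧ G b ∧ ¬ V b)) n x := by
  induction h with
  | refl => exact Or.inl Relation.ReflTransGen.refl
  | @tail m c h1 h2 ih =>
    by_cases hxN : pvAdj q c
    · exact Or.inr ⟨c, ⟨hxN, h2.2.1, h2.2.2⟩, Relation.ReflTransGen.refl⟩
    have hstep : pvStep G (fun b => V b ∨ (pvAdj q b ∧ G b ∧ ¬ V b)) m c :=
      ⟨h2.1, h2.2.1, fun hc => hc.elim h2.2.2 (fun hN => hxN hN.1)⟩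
    rcases ih with hl | ⟨n, hn1, hn2⟩
    · exact Or.inl (hl.tail hstep)
    · exact Or.inr ⟨n, hn1, hn2.tail hstep⟩

lemma pvComp_good {G : Int × Int → Prop} {s x : Int × Int} (hs : G s) (h : pvComp G s x) :
    G x := by
  rcases pvReach_good h with rfl | ⟨h1, _⟩
  · exact hs
  · exact h1

lemma pvReach_to_comp {G V : Int × Int → Prop} {s x : Int × Int}
    (h : pvReach G V s x) : pvComp G s x :=
  pvReach_mono (fun _ hb => hb.elim) h

lemma pvComp_to_reach {G V : Int × Int → Prop} {s x : Int × Int}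
    (hcl : pvClosed G V) (hs : G s) (hsV : ¬ V s) (h : pvComp G s x) :
    pvReach G V s x := by
  induction h with
  | refl => exact Relation.ReflTransGen.refl
  | @tail m c h1 h2 ih =>
    have hGm : G m := pvComp_good hs h1
    have hmV : ¬ V m := by
      rcases pvReach_good ih with rfl | ⟨_, h⟩
      · exact hsV
      · exact h
    have hxV : ¬ V c := fun hVc => hmV (hcl c m hVc hGm (pvAdj_symm h2.1))
    exact ih.tail ⟨h2.1, h2.2.1, hxV⟩

lemma pvComp_iff_reachB {G V : Int × Int → Prop} {s x : Int × Int}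
    (hcl : pvClosed G V) (hs : G s) (hsV : ¬ V s) :
    pvComp G s x ↔ (x = s ∨ pvReach G (fun b => V b ∨ b = s) s x) := by
  constructor
  · intro h
    induction h with
    | refl => exact Or.inl rfl
    | @tail m c h1 h2 ih =>
      by_cases hxs : c = s
      · exact Or.inl hxs
      have hGm : G m := pvComp_good hs h1
      have hmV : ¬ V m := by
        rcases ih with rfl | hr
        · exact hsV
        rcases pvReach_good hr with rfl | ⟨_, h⟩
        · exact hsV
        · exact fun hv => h (Or.inl hv)
      have hxV : ¬ V c := fun hVc => hmV (hcl c m hVc hGm (pvAdj_symm h2.1))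
      have hstep : pvStep G (fun b => V b ∨ b = s) m c :=
        ⟨h2.1, h2.2.1, fun hc => hc.elim hxV hxs⟩
      rcases ih with rfl | hr
      · exact Or.inr (Relation.ReflTransGen.single hstep)
      · exact Or.inr (hr.tail hstep)
  · rintro (rfl | h)
    · exact Relation.ReflTransGen.refl
    · exact pvReach_to_comp h

lemma pvClosed_congr {G V V' : Int × Int → Prop} (h : ∀ b, V b ↔ V' b)
    (hc : pvClosed G V) : pvClosed G V' := fun a b ha hGb hadj =>
  (h b).mp (hc a b ((h a).mpr ha) hGb hadj)

lemma pvClosed_union_comp {G V : Int × Int → Prop} {s : Int × Int} (hcl : pvClosed G V) :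
    pvClosed G (fun b => V b ∨ pvComp G s b) := by
  intro a b ha hGb hadj
  rcases ha with ha | ha
  · exact Or.inl (hcl a b ha hGb hadj)
  · exact Or.inr (ha.tail ⟨hadj, hGb, fun h => h⟩)

lemma pvAlen0_eq (g : List (List String)) : pvAlen0 g = ((g.headD []).length : Int) := by
  cases g
  · simp [pvAlen0, PySem.List.pyGet?]
  · rw [pvAlen0, PySem.List.pyGet?_zero_cons]; simp

lemma pvBcols_eq (g : List (List String)) : pvBcols g = ((g.headD []).length : Int) := by
  cases g
  · simp [pvBcols]
  · rw [pvBcols, if_neg (by simp), PySem.List.pyGet?_zero_cons]; simp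

lemma pvMem_nbrs {p x : Int × Int} : x ∈ pvBnbrs p ↔ pvAdj p x := by
  simp [pvBnbrs, pvAdj, Prod.ext_iff]

lemma pvNodup_nbrs (p : Int × Int) : (pvBnbrs p).Nodup := by
  simp [pvBnbrs, Prod.ext_iff]; omega

lemma pvMem_acells {g : List (List String)} {x : Int × Int} :
    x ∈ pvAcellsList g ↔ pvInB g x := by
  simp only [pvAcellsList, pvInB, List.mem_flatMap, List.mem_map]
  constructor
  · rintro ⟨r, hr, c, hc, rfl⟩
    simp at hr hc
    obtain ⟨a, ha, rfl⟩ := hr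
    obtain ⟨b, hb, rfl⟩ := hc
    refine ⟨?_, ?_, ?_, ?_⟩ <;> simp <;> omega
  · rintro ⟨h1, h2, h3, h4⟩
    simp only [List.headD_eq_head?_getD] at h4
    refine ⟨x.1, ?_, x.2, ?_, by simp⟩ <;> simp
    · exact ⟨x.1.toNat, by omega, by omega⟩
    · exact ⟨x.2.toNat, by omega, by omega⟩

lemma pvFoldConsMem {α β : Type} (l : List β) (Q : β → Prop) [DecidablePred Q]
    (m : β → α) (s : List α) (x : α) :
    x ∈ l.foldl (fun s d => if Q d then m d :: s else s) s ↔
      x ∈ s ∨ ∃ d ∈ l, Q d ∧ x = m d := by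
  induction l generalizing s with
  | nil => simp
  | cons d l ih =>
    rw [List.foldl_cons]
    by_cases hQ : Q d
    · rw [if_pos hQ, ih]; simp [hQ]; tauto
    · rw [if_neg hQ, ih]; simp [hQ]

lemma pvFoldConsLen {α β : Type} (l : List β) (Q : β → Prop) [DecidablePred Q]
    (m : β → α) (s : List α) :
    (l.foldl (fun s d => if Q d then m d :: s else s) s).length ≤ s.length + l.length := by
  induction l generalizing s with
  | nil => simp
  | cons d l ih =>
    rw [List.foldl_cons]
    by_cases hQ : Q d
    · rw [if_pos hQ]
      calc _ ≤ (m d :: s).length + l.length := ih _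
        _ = s.length + (d :: l).length := by simp; omega
    · rw [if_neg hQ]
      calc _ ≤ s.length + l.length := ih _
        _ ≤ s.length + (d :: l).length := by simp


lemma pvFilterLt {x : Int × Int} {l : List (Int × Int)} {s : PySem.Set (Int × Int)}
    (hx : x ∈ l) (hxs : x ∉ s) :
    (l.filter (fun y => decide (y ∉ PySem.Set.add s x))).length + 1 ≤
      (l.filter (fun y => decide (y ∉ s))).length := by
  have hpt : ∀ y : Int × Int, (decide (y ∉ PySem.Set.add s x)) =
      (decide (y ≠ x) && decide (y ∉ s)) := by
    intro y
    by_cases h1 : y ∈ s <;> by_cases h2 : y = x <;> simp [h1, h2, PySem.Set.mem_add]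
  rw [show (fun y : Int × Int => decide (y ∉ PySem.Set.add s x)) =
      (fun y => decide (y ≠ x) && decide (y ∉ s)) from funext hpt]
  rw [← List.filter_filter]
  have hmem : x ∈ l.filter (fun y => decide (y ∉ s)) := by
    simp [List.mem_filter, hx, hxs]
  have := (List.length_filter_lt_length_iff_exists (l := l.filter (fun y => decide (y ∉ s)))
      (p := fun y => decide (y ≠ x))).mpr ⟨x, hmem, by simp⟩
  omega

lemma pvBfold_spec (cells : PySem.Set (Int × Int)) :
    ∀ (ns : List (Int × Int)), ns.Nodup →
    ∀ (s : PySem.Set (Int × Int)) (t : List (Int × Int)),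
    (∀ x, x ∈ (ns.foldl (fun (st : PySem.Set (Int × Int) × List (Int × Int)) nb =>
        if nb ∈ cells ∧ ¬ nb ∈ st.1 then (PySem.Set.add st.1 nb, st.2 ++ [nb]) else st)
        (s, t)).1 ↔ x ∈ s ∨ (x ∈ ns ∧ x ∈ cells ∧ x ∉ s)) ∧
    (∀ x, x ∈ (ns.foldl (fun (st : PySem.Set (Int × Int) × List (Int × Int)) nb =>
        if nb ∈ cells ∧ ¬ nb ∈ st.1 then (PySem.Set.add st.1 nb, st.2 ++ [nb]) else st)
        (s, t)).2 ↔ x ∈ t ∨ (x ∈ ns ∧ x ∈ cells ∧ x ∉ s)) := by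
  intro ns
  induction ns with
  | nil => intro _ s t; simp
  | cons n ns ih =>
    intro hnd s t
    have hn : n ∉ ns := by simp at hnd; exact hnd.1
    rw [List.foldl_cons]
    by_cases hc : n ∈ cells ∧ ¬ n ∈ s
    · rw [if_pos hc]
      obtain ⟨ih1, ih2⟩ := ih hnd.of_cons (PySem.Set.add s n) (t ++ [n])
      constructor <;> intro x <;> [rw [ih1]; rw [ih2]] <;> by_cases hxn : x = n
      · subst hxn; simp [hc.1, hc.2]
      · simp only [PySem.Set.mem_add, List.mem_cons, hxn, or_false]
        tauto
      · subst hxn; simp [hc.1, hc.2, hn]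
      · simp only [PySem.Set.mem_add, List.mem_cons, List.mem_append, hxn, or_false]
        tauto
    · rw [if_neg hc]
      obtain ⟨ih1, ih2⟩ := ih hnd.of_cons s t
      have hc' : n ∈ cells → n ∈ s := fun h => by
        by_contra hh; exact hc ⟨h, hh⟩
      constructor <;> intro x <;> [rw [ih1]; rw [ih2]] <;> by_cases hxn : x = n
      · subst hxn; simp; tauto
      · simp only [List.mem_cons, hxn]; tauto
      · subst hxn; simp; tauto
      · simp only [List.mem_cons, hxn]; tauto

lemma pvBfoldLen (cells : PySem.Set (Int × Int)) :
    ∀ (ns : List (Int × Int)) (s : PySem.Set (Int × Int)) (t : List (Int × Int)),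
    (cells.filter (fun y => decide (y ∉ (ns.foldl (fun (st : PySem.Set (Int × Int) × List (Int × Int)) nb =>
        if nb ∈ cells ∧ ¬ nb ∈ st.1 then (PySem.Set.add st.1 nb, st.2 ++ [nb]) else st)
        (s, t)).1))).length +
      (ns.foldl (fun (st : PySem.Set (Int × Int) × List (Int × Int)) nb =>
        if nb ∈ cells ∧ ¬ nb ∈ st.1 then (PySem.Set.add st.1 nb, st.2 ++ [nb]) else st)
        (s, t)).2.length ≤
    (cells.filter (fun y => decide (y ∉ s))).length + t.length := by
  intro ns
  induction ns with
  | nil => intro s t; simp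
  | cons n ns ih =>
    intro s t
    rw [List.foldl_cons]
    by_cases hc : n ∈ cells ∧ ¬ n ∈ s
    · rw [if_pos hc]
      calc _ ≤ (cells.filter (fun y => decide (y ∉ PySem.Set.add s n))).length +
          (t ++ [n]).length := ih _ _
        _ ≤ _ := by
          have := pvFilterLt (s := s) hc.1 hc.2
          simp only [List.length_append, List.length_singleton]
          omega
    · rw [if_neg hc]
      exact ih s t

lemma pvAFrom_congr (g : List (List String)) (t : String) {V V' : Int × Int → Prop}
    {S S' : List (Int × Int)} (hV : ∀ b, V b ↔ V' b) (hS : ∀ y, y ∈ S ↔ y ∈ S')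
    (x : Int × Int) : pvAFrom g t V S x ↔ pvAFrom g t V' S' x := by
  unfold pvAFrom
  constructor <;> rintro ⟨q, h1, h2, h3, h4⟩
  · exact ⟨q, (hS q).mp h1, h2, fun h => h3 ((hV q).mpr h),
      (pvReach_congr (fun _ => Iff.rfl) hV).mp h4⟩
  · exact ⟨q, (hS q).mpr h1, h2, fun h => h3 ((hV q).mp h),
      (pvReach_congr (fun _ => Iff.rfl) hV).mpr h4⟩

lemma pvBFrom_congr (cells : PySem.Set (Int × Int)) {V V' : Int × Int → Prop}
    {S S' : List (Int × Int)} (hV : ∀ b, V b ↔ V' b) (hS : ∀ y, y ∈ S ↔ y ∈ S')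
    (x : Int × Int) : pvBFrom cells V S x ↔ pvBFrom cells V' S' x := by
  unfold pvBFrom
  constructor <;> rintro ⟨q, h1, h2⟩
  · exact ⟨q, (hS q).mp h1, (pvReach_congr (fun _ => Iff.rfl) hV).mp h2⟩
  · exact ⟨q, (hS q).mpr h1, (pvReach_congr (fun _ => Iff.rfl) hV).mpr h2⟩

lemma pvKeyA (g : List (List String)) (t : String) (V : Int × Int → Prop) (p : Int × Int)
    (rest stack' : List (Int × Int)) (hGp : pvGood g t p) (hpV : ¬ V p)
    (hS : ∀ y, y ∈ stack' ↔ y ∈ rest ∨ (pvAdj p y ∧ pvInB g y)) (x : Int × Int) :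
    pvAFrom g t V (p :: rest) x ↔
      x = p ∨ pvAFrom g t (fun b => V b ∨ b = p) stack' x := by
  constructor
  · rintro ⟨q, hq, hGq, hqV, hr⟩
    have handle_p : pvReach (pvGood g t) V p x →
        x = p ∨ pvAFrom g t (fun b => V b ∨ b = p) stack' x := by
      intro hrp
      rcases pvG1A hrp with rfl | ⟨n, h1, h2, h3, h4, h5⟩
      · exact Or.inl rfl
      · refine Or.inr ⟨n, (hS n).mpr (Or.inr ⟨h1, h2.1⟩), h2, ?_, h5⟩
        rintro (h | h)
        · exact h3 h
        · exact h4 h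
    rcases List.mem_cons.mp hq with rfl | hq'
    · exact handle_p hr
    · by_cases hqp : q = p
      · subst hqp; exact handle_p hr
      rcases pvG2A (p := p) hr with h | h
      · refine Or.inr ⟨q, (hS q).mpr (Or.inl hq'), hGq, ?_, h⟩
        rintro (h' | h')
        · exact hqV h'
        · exact hqp h'
      · exact handle_p h
  · rintro (rfl | ⟨q, hq', hGq, hqV', hr'⟩)
    · exact ⟨x, by simp, hGp, hpV, Relation.ReflTransGen.refl⟩
    rcases (hS q).mp hq' with hq | ⟨hadj, _⟩
    · exact ⟨q, by simp [hq], hGq, fun h => hqV' (Or.inl h),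
        pvReach_mono (fun _ => Or.inl) hr'⟩
    · exact ⟨p, by simp, hGp, hpV,
        Relation.ReflTransGen.head ⟨hadj, hGq, fun h => hqV' (Or.inl h)⟩
          (pvReach_mono (fun _ => Or.inl) hr')⟩

lemma pvKeyB (cells : PySem.Set (Int × Int)) (V : Int × Int → Prop) (q : Int × Int)
    (rest todo' : List (Int × Int))
    (hT : ∀ y, y ∈ todo' ↔ y ∈ rest ∨ (pvAdj q y ∧ y ∈ cells ∧ ¬ V y)) (x : Int × Int) :
    pvBFrom cells V (q :: rest) x ↔
      x = q ∨ pvBFrom cells (fun b => V b ∨ (pvAdj q b ∧ b ∈ cells ∧ ¬ V b)) todo' x := by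
  constructor
  · rintro ⟨r, hr, hreach⟩
    rcases List.mem_cons.mp hr with rfl | hr'
    · rcases pvG1B hreach with rfl | ⟨n, hn1, hn2⟩
      · exact Or.inl rfl
      · exact Or.inr ⟨n, (hT n).mpr (Or.inr hn1), hn2⟩
    · rcases pvG2B (q := q) hreach with h | ⟨n, hn1, hn2⟩
      · exact Or.inr ⟨r, (hT r).mpr (Or.inl hr'), h⟩
      · exact Or.inr ⟨n, (hT n).mpr (Or.inr hn1), hn2⟩
  · rintro (rfl | ⟨y, hy, hreach⟩)
    · exact ⟨x, by simp, Relation.ReflTransGen.refl⟩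
    rcases (hT y).mp hy with hy' | hN
    · exact ⟨y, by simp [hy'], pvReach_mono (fun _ => Or.inl) hreach⟩
    · exact ⟨q, by simp, Relation.ReflTransGen.head ⟨hN.1, hN.2.1, hN.2.2⟩
        (pvReach_mono (fun _ => Or.inl) hreach)⟩

lemma pvAdfs_char (g : List (List String)) (t : String) :
    ∀ (fuel : Nat) (stack : List (Int × Int)) (visited : PySem.Set (Int × Int))
      (cluster : List (Int × Int)),
    (∀ p ∈ stack, pvInB g p) →
    5 * ((pvAcellsList g).filter (fun y => decide (y ∉ visited))).length + stack.length < fuel →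
    (∀ x, x ∈ (pvAdfs g t fuel stack visited cluster).1 ↔
        x ∈ visited ∨ pvAFrom g t (fun y => y ∈ visited) stack x) ∧
    (∀ x, x ∈ (pvAdfs g t fuel stack visited cluster).2 ↔
        x ∈ cluster ∨ pvAFrom g t (fun y => y ∈ visited) stack x) := by
  intro fuel
  induction fuel with
  | zero => intro stack _ _ _ h; omega
  | succ fuel ih =>
    rintro (_ | ⟨p, stack⟩) visited cluster hstack hfuel
    · simp [pvAdfs, pvAFrom]
    by_cases hcond : ¬ p ∈ visited ∧ pvAcell g p.1 p.2 = t
    · simp only [pvAdfs, if_pos hcond]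
      have hInBp : pvInB g p := hstack p (by simp)
      have hGp : pvGood g t p := ⟨hInBp, hcond.2⟩
      have hSmem : ∀ y, y ∈ ([((1 : Int), (0 : Int)), (-1, 0), (0, 1), (0, -1)].foldl
          (fun s d => if 0 ≤ p.1 + d.1 ∧ p.1 + d.1 < (g.length : Int) ∧
              0 ≤ p.2 + d.2 ∧ p.2 + d.2 < pvAlen0 g
            then (p.1 + d.1, p.2 + d.2) :: s else s) stack) ↔
          y ∈ stack ∨ (pvAdj p y ∧ pvInB g y) := by
        intro y
        rw [pvFoldConsMem]
        refine or_congr Iff.rfl ?_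
        rw [pvAlen0_eq]
        rcases y with ⟨a, b⟩
        simp [pvAdj, pvInB, Prod.ext_iff]
        constructor
        · rintro ⟨da, db, hd, hb1, rfl, rfl⟩
          omega
        · rintro ⟨hadj, hb⟩
          rcases hadj with ⟨rfl, rfl⟩ | ⟨rfl, rfl⟩ | ⟨rfl, rfl⟩ | ⟨rfl, rfl⟩
          · exact ⟨1, 0, by omega⟩
          · exact ⟨-1, 0, by omega⟩
          · exact ⟨0, 1, by omega⟩
          · exact ⟨0, -1, by omega⟩
      have hstack' : ∀ q ∈ ([((1 : Int), (0 : Int)), (-1, 0), (0, 1), (0, -1)].foldl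
          (fun s d => if 0 ≤ p.1 + d.1 ∧ p.1 + d.1 < (g.length : Int) ∧
              0 ≤ p.2 + d.2 ∧ p.2 + d.2 < pvAlen0 g
            then (p.1 + d.1, p.2 + d.2) :: s else s) stack), pvInB g q := by
        intro q hq
        rcases (hSmem q).mp hq with h | ⟨_, h⟩
        · exact hstack q (by simp [h])
        · exact h
      have hplt := pvFilterLt (l := pvAcellsList g) (pvMem_acells.mpr hInBp) hcond.1
      have hlen := pvFoldConsLen [((1 : Int), (0 : Int)), (-1, 0), (0, 1), (0, -1)]
        (fun d => 0 ≤ p.1 + d.1 ∧ p.1 + d.1 < (g.length : Int) ∧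
          0 ≤ p.2 + d.2 ∧ p.2 + d.2 < pvAlen0 g)
        (fun d => (p.1 + d.1, p.2 + d.2)) stack
      obtain ⟨ih1, ih2⟩ := ih _ (PySem.Set.add visited p) (cluster ++ [p]) hstack'
        (by simp only [List.length_cons, List.length_nil] at hfuel hlen ⊢; omega)
      have hkey := pvKeyA g t (fun y => y ∈ visited) p stack _ hGp hcond.1 hSmem
      have hVc : ∀ b : Int × Int, b ∈ PySem.Set.add visited p ↔ b ∈ visited ∨ b = p :=
        fun b => PySem.Set.mem_add visited p b
      constructor <;> intro x
      · rw [ih1, pvAFrom_congr g t hVc (fun y => Iff.rfl) x]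
        rw [hVc x]
        rcases hkey x with hk
        constructor
        · rintro ((h | h) | h)
          · exact Or.inl h
          · exact Or.inr (hk.mpr (Or.inl h))
          · exact Or.inr (hk.mpr (Or.inr h))
        · rintro (h | h)
          · exact Or.inl (Or.inl h)
          · rcases hk.mp h with h' | h'
            · exact Or.inl (Or.inr h')
            · exact Or.inr h'
      · rw [ih2, pvAFrom_congr g t hVc (fun y => Iff.rfl) x]
        rw [List.mem_append, List.mem_singleton]
        rcases hkey x with hk
        constructor
        · rintro ((h | h) | h)
          · exact Or.inl h
          · exact Or.inr (hk.mpr (Or.inl h))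
          · exact Or.inr (hk.mpr (Or.inr h))
        · rintro (h | h)
          · exact Or.inl (Or.inl h)
          · rcases hk.mp h with h' | h'
            · exact Or.inl (Or.inr h')
            · exact Or.inr h'
    · simp only [pvAdfs, if_neg hcond]
      obtain ⟨ih1, ih2⟩ := ih stack visited cluster
        (fun q hq => hstack q (by simp [hq]))
        (by simp only [List.length_cons] at hfuel; omega)
      have hdrop : ∀ x, pvAFrom g t (fun y => y ∈ visited) (p :: stack) x ↔
          pvAFrom g t (fun y => y ∈ visited) stack x := by
        intro x
        constructor
        · rintro ⟨q, hq, h2, h3, h4⟩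
          rcases List.mem_cons.mp hq with rfl | hq'
          · exact absurd ⟨h3, h2.2⟩ hcond
          · exact ⟨q, hq', h2, h3, h4⟩
        · rintro ⟨q, hq, h2, h3, h4⟩
          exact ⟨q, by simp [hq], h2, h3, h4⟩
      exact ⟨fun x => by rw [ih1, hdrop], fun x => by rw [ih2, hdrop]⟩

lemma pvBbfs_char (cells : PySem.Set (Int × Int)) :
    ∀ (fuel : Nat) (todo : List (Int × Int)) (seen : PySem.Set (Int × Int)) (has : Bool),
    (∀ q ∈ todo, q ∈ seen) →
    (cells.filter (fun y => decide (y ∉ seen))).length + todo.length < fuel →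
    (∀ x, x ∈ (pvBbfs cells fuel todo seen has).1 ↔
        x ∈ seen ∨ pvBFrom cells (fun y => y ∈ seen) todo x) ∧
    ((pvBbfs cells fuel todo seen has).2 = true ↔ has = true ∨
        ∃ x, pvBFrom cells (fun y => y ∈ seen) todo x ∧ pvBlkP cells x) := by
  intro fuel
  induction fuel with
  | zero => intro todo _ _ _ h; omega
  | succ fuel ih =>
    rintro (_ | ⟨q, todo⟩) seen has htodo hfuel
    · simp [pvBbfs, pvBFrom]
    simp only [pvBbfs]
    obtain ⟨hf1, hf2⟩ := pvBfold_spec cells (pvBnbrs q) (pvNodup_nbrs q) seen todo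
    have hV1 : ∀ b : Int × Int, b ∈ ((pvBnbrs q).foldl
        (fun (st : PySem.Set (Int × Int) × List (Int × Int)) nb =>
          if nb ∈ cells ∧ ¬ nb ∈ st.1 then (PySem.Set.add st.1 nb, st.2 ++ [nb]) else st)
        (seen, todo)).1 ↔
        b ∈ seen ∨ (pvAdj q b ∧ b ∈ cells ∧ ¬ b ∈ seen) := by
      intro b; rw [hf1]
      simp only [pvMem_nbrs]
    have hT : ∀ y : Int × Int, y ∈ ((pvBnbrs q).foldl
        (fun (st : PySem.Set (Int × Int) × List (Int × Int)) nb =>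
          if nb ∈ cells ∧ ¬ nb ∈ st.1 then (PySem.Set.add st.1 nb, st.2 ++ [nb]) else st)
        (seen, todo)).2 ↔
        y ∈ todo ∨ (pvAdj q y ∧ y ∈ cells ∧ ¬ y ∈ seen) := by
      intro y; rw [hf2]
      simp only [pvMem_nbrs]
    have htodo' : ∀ r ∈ ((pvBnbrs q).foldl
        (fun (st : PySem.Set (Int × Int) × List (Int × Int)) nb =>
          if nb ∈ cells ∧ ¬ nb ∈ st.1 then (PySem.Set.add st.1 nb, st.2 ++ [nb]) else st)
        (seen, todo)).2, r ∈ ((pvBnbrs q).foldl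
        (fun (st : PySem.Set (Int × Int) × List (Int × Int)) nb =>
          if nb ∈ cells ∧ ¬ nb ∈ st.1 then (PySem.Set.add st.1 nb, st.2 ++ [nb]) else st)
        (seen, todo)).1 := by
      intro r hr
      rcases (hT r).mp hr with h | h
      · exact (hV1 r).mpr (Or.inl (htodo r (by simp [h])))
      · exact (hV1 r).mpr (Or.inr h)
    have hflen := pvBfoldLen cells (pvBnbrs q) seen todo
    obtain ⟨ih1, ih2⟩ := ih _ _
      (has || (cells.contains (q.1 + 1, q.2) && cells.contains (q.1, q.2 + 1) &&
        cells.contains (q.1 + 1, q.2 + 1))) htodo'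
      (by simp only [List.length_cons] at hfuel; omega)
    have hkey := pvKeyB cells (fun y => y ∈ seen) q todo _ hT
    constructor
    · intro x
      rw [ih1, pvBFrom_congr cells hV1 (fun _ => Iff.rfl) x, hV1 x]
      constructor
      · rintro ((h | h) | h)
        · exact Or.inl h
        · exact Or.inr ((hkey x).mpr (Or.inr ⟨x, (hT x).mpr (Or.inr h),
            Relation.ReflTransGen.refl⟩))
        · exact Or.inr ((hkey x).mpr (Or.inr h))
      · rintro (h | h)
        · exact Or.inl (Or.inl h)
        · rcases (hkey x).mp h with rfl | h'
          · exact Or.inl (Or.inl (htodo x (by simp)))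
          · exact Or.inr h'
    · rw [ih2]
      have hhas : (has || (cells.contains (q.1 + 1, q.2) && cells.contains (q.1, q.2 + 1) &&
          cells.contains (q.1 + 1, q.2 + 1))) = true ↔ has = true ∨ pvBlkP cells q := by
        simp [pvBlkP]
        tauto
      rw [hhas]
      constructor
      · rintro ((h | h) | ⟨x, hx, hblk⟩)
        · exact Or.inl h
        · exact Or.inr ⟨q, ⟨q, by simp, Relation.ReflTransGen.refl⟩, h⟩
        · refine Or.inr ⟨x, ?_, hblk⟩
          exact (hkey x).mpr (Or.inr ((pvBFrom_congr cells hV1 (fun _ => Iff.rfl) x).mp hx))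
      · rintro (h | ⟨x, hx, hblk⟩)
        · exact Or.inl (Or.inl h)
        · rcases (hkey x).mp hx with rfl | h'
          · exact Or.inl (Or.inr hblk)
          · exact Or.inr ⟨x, (pvBFrom_congr cells hV1 (fun _ => Iff.rfl) x).mpr h', hblk⟩

-- (Pre_ is where the Python programs return; the totalized ports agree on it, so the proof needs no more than its presence)
lemma pvCellsChar (g : List (List String)) (t : String) (_hpre : Pre_gnomishcolony g t) :
    ∀ x, x ∈ pvBcells g t ↔ pvGood g t x := by
  intro x
  simp only [pvBcells, PySem.Set.mem_ofList, List.mem_flatMap, List.mem_filter,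
    List.mem_map, PySem.List.mem_pyRange_one, pvBcols_eq]
  unfold pvGood pvInB pvAcell
  constructor
  · rintro ⟨r, hr, c, ⟨hc, hbeq⟩, rfl⟩
    exact ⟨⟨hr.1, hr.2, hc.1, hc.2⟩, by simpa using hbeq⟩
  · rintro ⟨⟨h1, h2, h3, h4⟩, hcell⟩
    exact ⟨x.1, ⟨h1, h2⟩, x.2, ⟨⟨h3, h4⟩, by simpa using hcell⟩, by simp⟩

lemma pvBlockBridge (g : List (List String)) (t : String) {s : Int × Int}
    (hGs : pvGood g t s) :
    (∃ rc : Int × Int, pvComp (pvGood g t) s rc ∧ pvComp (pvGood g t) s (rc.1 + 1, rc.2) ∧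
      pvComp (pvGood g t) s (rc.1, rc.2 + 1) ∧ pvComp (pvGood g t) s (rc.1 + 1, rc.2 + 1)) ↔
    (∃ x : Int × Int, pvComp (pvGood g t) s x ∧ pvGood g t (x.1 + 1, x.2) ∧
      pvGood g t (x.1, x.2 + 1) ∧ pvGood g t (x.1 + 1, x.2 + 1)) := by
  constructor
  · rintro ⟨rc, h0, h1, h2, h3⟩
    exact ⟨rc, h0, pvComp_good hGs h1, pvComp_good hGs h2, pvComp_good hGs h3⟩
  · rintro ⟨x, h0, h1, h2, h3⟩
    have hs1 : pvComp (pvGood g t) s (x.1 + 1, x.2) :=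
      h0.tail ⟨Or.inl ⟨rfl, rfl⟩, h1, fun h => h⟩
    have hs2 : pvComp (pvGood g t) s (x.1, x.2 + 1) :=
      h0.tail ⟨Or.inr (Or.inr (Or.inl ⟨rfl, rfl⟩)), h2, fun h => h⟩
    have hs3 : pvComp (pvGood g t) s (x.1 + 1, x.2 + 1) :=
      hs1.tail ⟨Or.inr (Or.inr (Or.inl ⟨rfl, rfl⟩)), h3, fun h => h⟩
    exact ⟨x, h0, hs1, hs2, hs3⟩

lemma pvCellStep (g : List (List String)) (t : String)
    (hcells : ∀ x, x ∈ pvBcells g t ↔ pvGood g t x) (r c : Int)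
    (hInB : pvInB g (r, c))
    (stA : PySem.Set (Int × Int) × List (List (Int × Int)))
    (stB : PySem.Set (Int × Int) × Int) (hinv : pvInv g t stA stB) :
    pvInv g t
      (if ¬ (r, c) ∈ stA.1 ∧ pvAcell g r c = t then
        ((pvAdfs g t (5 * (pvAcellsList g).length + 2) [(r, c)] stA.1 []).1,
         stA.2 ++ [(pvAdfs g t (5 * (pvAcellsList g).length + 2) [(r, c)] stA.1 []).2])
       else stA)
      (if (r, c) ∈ pvBcells g t ∧ ¬ (r, c) ∈ stB.1 then
        ((pvBbfs (pvBcells g t) ((pvBcells g t).length + 2) [(r, c)]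
            (PySem.Set.add stB.1 (r, c)) false).1,
         if (pvBbfs (pvBcells g t) ((pvBcells g t).length + 2) [(r, c)]
            (PySem.Set.add stB.1 (r, c)) false).2 then stB.2 + 6 else stB.2)
       else stB) := by
  obtain ⟨hmem, hgood, hclosed, hsc⟩ := hinv
  by_cases hg : pvGood g t (r, c) ∧ ¬ (r, c) ∈ stA.1
  · rw [if_pos ⟨hg.2, hg.1.2⟩, if_pos ⟨(hcells (r, c)).mpr hg.1, fun h => hg.2 ((hmem (r, c)).mpr h)⟩]
    set s : Int × Int := (r, c) with hs
    have hGs : pvGood g t s := hg.1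
    have hsVa : ¬ s ∈ stA.1 := hg.2
    obtain ⟨hA1, hA2⟩ := pvAdfs_char g t (5 * (pvAcellsList g).length + 2) [s] stA.1 []
      (by intro p hp; simp at hp; subst hp; exact hGs.1)
      (by have := List.length_filter_le (fun y => decide (y ∉ stA.1)) (pvAcellsList g)
          simp only [List.length_cons, List.length_nil]; omega)
    obtain ⟨hB1, hB2⟩ := pvBbfs_char (pvBcells g t) ((pvBcells g t).length + 2) [s]
      (PySem.Set.add stB.1 s) false
      (by intro q hq; simp at hq; subst hq; exact (PySem.Set.mem_add stB.1 s s).mpr (Or.inr rfl))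
      (by have := List.length_filter_le (fun y => decide (y ∉ PySem.Set.add stB.1 s)) (pvBcells g t)
          simp only [List.length_cons, List.length_nil]; omega)
    have hAF : ∀ x, pvAFrom g t (fun y => y ∈ stA.1) [s] x ↔ pvComp (pvGood g t) s x := by
      intro x
      constructor
      · rintro ⟨q, hq, _, _, hr⟩
        simp at hq; subst hq
        exact pvReach_to_comp hr
      · intro h
        exact ⟨s, by simp, hGs, hsVa, pvComp_to_reach hclosed hGs hsVa h⟩
    have hVb : ∀ b : Int × Int, b ∈ PySem.Set.add stB.1 s ↔ (b ∈ stA.1 ∨ b = s) := by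
      intro b
      rw [PySem.Set.mem_add]
      exact or_congr (hmem b).symm Iff.rfl
    have hBFr : ∀ x, pvBFrom (pvBcells g t) (fun y => y ∈ PySem.Set.add stB.1 s) [s] x ↔
        pvReach (pvGood g t) (fun b => b ∈ stA.1 ∨ b = s) s x := by
      intro x
      constructor
      · rintro ⟨q, hq, hr⟩
        simp at hq; subst hq
        exact (pvReach_congr hcells hVb).mp hr
      · intro h
        exact ⟨s, by simp, (pvReach_congr hcells hVb).mpr h⟩
    have hcompB : ∀ x, (x = s ∨ pvReach (pvGood g t) (fun b => b ∈ stA.1 ∨ b = s) s x) ↔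
        pvComp (pvGood g t) s x := fun x => (pvComp_iff_reachB hclosed hGs hsVa).symm
    refine ⟨?_, ?_, ?_, ?_⟩
    · intro x
      rw [hA1 x, hB1 x, hVb x, hAF x, hBFr x]
      rcases hcompB x with hc
      constructor
      · rintro (h | h)
        · exact Or.inl (Or.inl h)
        · rcases hc.mpr h with h' | h'
          · exact Or.inl (Or.inr h')
          · exact Or.inr h'
      · rintro ((h | h) | h)
        · exact Or.inl h
        · exact Or.inr (hc.mp (Or.inl h))
        · exact Or.inr (hc.mp (Or.inr h))
    · intro x hx
      rcases (hA1 x).mp hx with h | h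
      · exact hgood x h
      · exact pvComp_good hGs ((hAF x).mp h)
    · refine pvClosed_congr (V := fun b => b ∈ stA.1 ∨ pvComp (pvGood g t) s b) ?_
        (pvClosed_union_comp hclosed)
      intro b
      rw [hA1 b, hAF b]
    · have hAc : ∀ x, x ∈ (pvAdfs g t (5 * (pvAcellsList g).length + 2) [s] stA.1 []).2 ↔
          pvComp (pvGood g t) s x := by
        intro x
        rw [hA2 x, hAF x]
        simp
      have hcnt : pvCnt (pvAdfs g t (5 * (pvAcellsList g).length + 2) [s] stA.1 []).2 =
          (pvBbfs (pvBcells g t) ((pvBcells g t).length + 2) [s]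
            (PySem.Set.add stB.1 s) false).2 := by
        rw [Bool.eq_iff_iff]
        have h2x2 : (pvCnt (pvAdfs g t (5 * (pvAcellsList g).length + 2) [s] stA.1 []).2 = true) ↔
            ∃ rc : Int × Int, pvComp (pvGood g t) s rc ∧
              pvComp (pvGood g t) s (rc.1 + 1, rc.2) ∧
              pvComp (pvGood g t) s (rc.1, rc.2 + 1) ∧
              pvComp (pvGood g t) s (rc.1 + 1, rc.2 + 1) := by
          simp only [pvCnt, List.any_eq_true, Bool.and_eq_true, List.contains_iff_mem]
          constructor
          · rintro ⟨rc, hrc, ⟨⟨h1, h2⟩, h3⟩, h4⟩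
            exact ⟨rc, (hAc rc).mp h1, (hAc _).mp h2, (hAc _).mp h3, (hAc _).mp h4⟩
          · rintro ⟨rc, h1, h2, h3, h4⟩
            exact ⟨rc, (hAc rc).mpr h1, ⟨⟨(hAc rc).mpr h1, (hAc _).mpr h2⟩, (hAc _).mpr h3⟩,
              (hAc _).mpr h4⟩
        rw [h2x2, pvBlockBridge g t hGs, hB2]
        simp only [Bool.false_eq_true, false_or]
        constructor
        · rintro ⟨x, h0, h1, h2, h3⟩
          refine ⟨x, ?_, (hcells _).mpr h1, (hcells _).mpr h2, (hcells _).mpr h3⟩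
          rcases (hcompB x).mpr h0 with rfl | h'
          · exact ⟨s, by simp, Relation.ReflTransGen.refl⟩
          · exact (hBFr x).mpr h'
        · rintro ⟨x, h0, h1, h2, h3⟩
          exact ⟨x, (hcompB x).mp (Or.inr ((hBFr x).mp h0)),
            (hcells _).mp h1, (hcells _).mp h2, (hcells _).mp h3⟩
      rw [← hcnt, List.countP_append]
      simp only [List.countP_cons, List.countP_nil]
      rcases hb : pvCnt (pvAdfs g t (5 * (pvAcellsList g).length + 2) [s] stA.1 []).2 with _ | _
      · simp [hsc]
      · simp [hsc]
        omega
  · have hga : ¬ (¬ (r, c) ∈ stA.1 ∧ pvAcell g r c = t) := by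
      intro ⟨h1, h2⟩
      exact hg ⟨⟨hInB, h2⟩, h1⟩
    have hgb : ¬ ((r, c) ∈ pvBcells g t ∧ ¬ (r, c) ∈ stB.1) := by
      intro ⟨h1, h2⟩
      exact hg ⟨(hcells (r, c)).mp h1, fun h => h2 ((hmem (r, c)).mp h)⟩
    rw [if_neg hga, if_neg hgb]
    exact ⟨hmem, hgood, hclosed, hsc⟩

lemma pvCols (g : List (List String)) (t : String)
    (hcells : ∀ x, x ∈ pvBcells g t ↔ pvGood g t x) (r : Int)
    (hr : 0 ≤ r ∧ r < (g.length : Int)) :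
    ∀ (cols : List Int), (∀ c ∈ cols, 0 ≤ c ∧ c < ((g.headD []).length : Int)) →
    ∀ (stA : PySem.Set (Int × Int) × List (List (Int × Int)))
      (stB : PySem.Set (Int × Int) × Int), pvInv g t stA stB →
    pvInv g t
      (cols.foldl (fun st col =>
        if (r, col) ∉ st.1 ∧ pvAcell g r col = t then
          ((pvAdfs g t (5 * (pvAcellsList g).length + 2) [(r, col)] st.1 []).1,
            st.2 ++ [(pvAdfs g t (5 * (pvAcellsList g).length + 2) [(r, col)] st.1 []).2])
        else st) stA)
      (cols.foldl (fun st c =>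
        if (r, c) ∈ pvBcells g t ∧ (r, c) ∉ st.1 then
          ((pvBbfs (pvBcells g t) ((pvBcells g t).length + 2) [(r, c)]
              (PySem.Set.add st.1 (r, c)) false).1,
            if (pvBbfs (pvBcells g t) ((pvBcells g t).length + 2) [(r, c)]
                (PySem.Set.add st.1 (r, c)) false).2 = true then st.2 + 6 else st.2)
        else st) stB) := by
  intro cols
  induction cols with
  | nil => intro _ stA stB hinv; exact hinv
  | cons c cols ih =>
    intro hc stA stB hinv
    rw [List.foldl_cons, List.foldl_cons]
    refine ih (fun c' hc' => hc c' (by simp [hc'])) _ _ ?_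
    have hcb := hc c (by simp)
    exact pvCellStep g t hcells r c ⟨hr.1, hr.2, hcb.1, hcb.2⟩ stA stB hinv

lemma pvRows (g : List (List String)) (t : String)
    (hcells : ∀ x, x ∈ pvBcells g t ↔ pvGood g t x) :
    ∀ (rows : List Int), (∀ r ∈ rows, 0 ≤ r ∧ r < (g.length : Int)) →
    ∀ (stA : PySem.Set (Int × Int) × List (List (Int × Int)))
      (stB : PySem.Set (Int × Int) × Int), pvInv g t stA stB →
    pvInv g t
      (rows.foldl (fun st row =>
        (PySem.List.pyRange 0 ((g.headD []).length : Int) 1).foldl (fun st col =>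
          if (row, col) ∉ st.1 ∧ pvAcell g row col = t then
            ((pvAdfs g t (5 * (pvAcellsList g).length + 2) [(row, col)] st.1 []).1,
              st.2 ++ [(pvAdfs g t (5 * (pvAcellsList g).length + 2) [(row, col)] st.1 []).2])
          else st) st) stA)
      (rows.foldl (fun st r =>
        (PySem.List.pyRange 0 ((g.headD []).length : Int) 1).foldl (fun st c =>
          if (r, c) ∈ pvBcells g t ∧ (r, c) ∉ st.1 then
            ((pvBbfs (pvBcells g t) ((pvBcells g t).length + 2) [(r, c)]
                (PySem.Set.add st.1 (r, c)) false).1,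
              if (pvBbfs (pvBcells g t) ((pvBcells g t).length + 2) [(r, c)]
                  (PySem.Set.add st.1 (r, c)) false).2 = true then st.2 + 6 else st.2)
          else st) st) stB) := by
  intro rows
  induction rows with
  | nil => intro _ stA stB hinv; exact hinv
  | cons r rows ih =>
    intro hrow stA stB hinv
    rw [List.foldl_cons, List.foldl_cons]
    refine ih (fun r' hr' => hrow r' (by simp [hr'])) _ _ ?_
    refine pvCols g t hcells r (hrow r (by simp)) _ ?_ stA stB hinv
    intro c hc
    rw [PySem.List.mem_pyRange_one] at hc
    exact hc

-- ===== VERDICT (by name: the statement is the Claim_ definition above) =====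
theorem gnomishcolony_spec : Claim_equal_gnomishcolony := by
  intro g t hdom hpre
  unfold Spec_gnomishcolony
  simp only [gnomishcolony, gnomishcolony_alt]
  rw [pvAlen0_eq g, pvBcols_eq g]
  have hinv0 : pvInv g t (PySem.Set.empty, ([] : List (List (Int × Int))))
      (PySem.Set.empty, (0 : Int)) := by
    refine ⟨by simp [PySem.Set.empty], by simp [PySem.Set.empty], ?_, by simp⟩
    intro a b ha
    simp [PySem.Set.empty] at ha
  have h := pvRows g t (pvCellsChar g t hpre) (PySem.List.pyRange 0 (g.length : Int) 1)
    (fun r hr => (PySem.List.mem_pyRange_one.mp hr)) _ _ hinv0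
  obtain ⟨-, -, -, hsc⟩ := h
  rw [PySem.List.foldl_if_add_one]
  rw [hsc]
  show (0 + ((List.countP pvCnt _ : Nat) : Int)) * 6 = 6 * _
  omega
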